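-- pv_equiv track=rewrite | github.com/Marco-Mello/artigo_01 | codigo_Artigo/funcoes_decodificador.py | gerar_mapeamentos_por_bloco
-- ===== SOURCE A (Python) =====
-- def gerar_mapeamentos_por_bloco(bloco, top_words, used_top_words=None):
--     if not isinstance(top_words, dict):
--         raise TypeError("top_words deve ser um dict palavra->rank")
--     if used_top_words is None:
--         used_top_words = set()
--
--     top_sorted = sorted(top_words.items(), key=lambda item: item[1])
--     mapa = {}
--     letras_usadas = set()
--     mapeamentos = []
--
--     def primeira_candidata_disponivel(tamanho):
--         for w, _rank in top_sorted:
--             if len(w) == tamanho and w not in used_top_words: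
--                 return w
--         return None
--
--     for pos, palavra in bloco:
--         if palavra.islower():
--             continue
--         candidata = primeira_candidata_disponivel(len(palavra))
--         if not candidata:
--             continue
--         for c_cifrado, c_claro in zip(palavra, candidata):
--             c_claro_lower = c_claro.lower()
--             if c_cifrado.islower():
--                 continue
--             if c_cifrado in mapa:
--                 if mapa[c_cifrado] == c_claro_lower:
--                     continue
--                 else:
--                     continue
--             if c_claro_lower in letras_usadas:
--                 continue
--             mapa[c_cifrado] = c_claro_lower
--             letras_usadas.add(c_claro_lower)
--             mapeamentos.append((c_cifrado, c_claro_lower))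
--         used_top_words.add(candidata)
--
--     return mapeamentos
-- ===== SOURCE B (Python) =====
-- def gerar_mapeamentos_por_bloco(bloco, top_words, used_top_words=None):
--     if not isinstance(top_words, dict):
--         raise TypeError("top_words deve ser um dict palavra->rank")
--     if used_top_words is None:
--         used_top_words = set()
--
--     fresh = [w for w, _rank in sorted(top_words.items(), key=lambda item: item[1])
--              if w not in used_top_words]
--     by_len = {}
--     for w in fresh:
--         by_len.setdefault(len(w), []).append(w)
--
--     nxt = {}
--     mapped = set()
--     letras_usadas = set()
--     mapeamentos = []
--     for _pos, palavra in bloco: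
--         if palavra.islower():
--             continue
--         L = len(palavra)
--         lst = by_len.get(L, [])
--         i = nxt.get(L, 0)
--         if i >= len(lst):
--             continue
--         candidata = lst[i]
--         if not candidata:
--             continue
--         nxt[L] = i + 1
--         for c_cifrado, c_claro in zip(palavra, candidata):
--             if c_cifrado.islower() or c_cifrado in mapped:
--                 continue
--             c = c_claro.lower()
--             if c in letras_usadas:
--                 continue
--             mapped.add(c_cifrado)
--             letras_usadas.add(c)
--             mapeamentos.append((c_cifrado, c))
--         used_top_words.add(candidata)
--     return mapeamentos
-- ===== Notes on version B (the rewrite author's own statement) =====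
-- stated objective: alternative
-- what changed: A rescans the whole rank-sorted word list for every block word to find the first unused word of the right length; B instead filters out initially-used words once, groups the sorted words by length, and advances a per-length cursor past consumed words.
import Mathlib
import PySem

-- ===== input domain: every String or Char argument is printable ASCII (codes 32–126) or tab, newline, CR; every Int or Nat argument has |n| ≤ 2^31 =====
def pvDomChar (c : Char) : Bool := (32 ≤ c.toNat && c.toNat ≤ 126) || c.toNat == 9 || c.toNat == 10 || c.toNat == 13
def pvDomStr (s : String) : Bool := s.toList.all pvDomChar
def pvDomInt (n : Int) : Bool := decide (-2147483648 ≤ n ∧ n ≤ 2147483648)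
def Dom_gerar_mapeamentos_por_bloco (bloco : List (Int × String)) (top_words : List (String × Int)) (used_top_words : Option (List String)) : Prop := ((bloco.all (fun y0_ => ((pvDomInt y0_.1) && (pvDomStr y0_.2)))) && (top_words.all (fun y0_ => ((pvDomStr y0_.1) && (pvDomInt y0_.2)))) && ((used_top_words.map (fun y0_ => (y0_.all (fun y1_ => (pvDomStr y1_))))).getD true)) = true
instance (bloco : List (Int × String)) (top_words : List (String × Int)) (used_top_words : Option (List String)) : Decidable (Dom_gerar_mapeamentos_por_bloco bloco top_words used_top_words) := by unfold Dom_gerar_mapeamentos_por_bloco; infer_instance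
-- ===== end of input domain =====

-- B replaces A's per-word rescan of the whole rank-sorted word list by a one-time grouping by
-- length with a per-length cursor (alternative algorithm, same return value); both Pythons add
-- the consumed candidate words to a caller-supplied used_top_words set in the same way, and the
-- equivalence proved here is about the return value.

-- s.islower() on the ASCII domain: at least one cased character and no uppercase one
def pvIslower (l : List Char) : Bool :=
  (l.any (fun c => PySem.Chars.isupper c || PySem.Chars.islower c)) &&
  (l.all (fun c => !(PySem.Chars.isupper c)))

-- ===== PORT A =====

-- A's helper primeira_candidata_disponivel: linear scan of the sorted list
def pvPrimeiraCandidata (top_sorted : List (String × Int)) (used : PySem.Set String) (tamanho : Int) : Option String :=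
  match top_sorted with
  | [] => none
  | (w, _) :: rest =>
    if PySem.Str.len w == tamanho && !(PySem.Set.contains used w) then some w
    else pvPrimeiraCandidata rest used tamanho

-- A's inner letter loop body (Python's 'if mapa[c_cifrado] == …' continues on both branches)
def pvPassoLetraA (st : PySem.Dict Char Char × PySem.Set Char × List (String × String)) (p : Char × Char) :
    PySem.Dict Char Char × PySem.Set Char × List (String × String) :=
  let cll := PySem.Chars.lowerChar p.2
  if PySem.Chars.islower p.1 then st
  else if st.1.contains p.1 then st
  else if PySem.Set.contains st.2.1 cll then st
  else (st.1.insert p.1 cll, PySem.Set.add st.2.1 cll, st.2.2 ++ [(String.mk [p.1], String.mk [cll])])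

-- A's outer loop body; state = (mapa, letras_usadas, used_top_words, mapeamentos)
def pvPassoBlocoA (top_sorted : List (String × Int))
    (st : PySem.Dict Char Char × PySem.Set Char × PySem.Set String × List (String × String))
    (pp : Int × String) :
    PySem.Dict Char Char × PySem.Set Char × PySem.Set String × List (String × String) :=
  if pvIslower pp.2.toList then st
  else
    match pvPrimeiraCandidata top_sorted st.2.2.1 (PySem.Str.len pp.2) with
    | none => st
    | some cand =>
      if cand = "" then st  -- 'if not candidata' also skips the empty string
      else
        let r := (pp.2.toList.zip cand.toList).foldl pvPassoLetraA (st.1, st.2.1, st.2.2.2)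
        (r.1, r.2.1, PySem.Set.add st.2.2.1 cand, r.2.2)

def gerar_mapeamentos_por_bloco (bloco : List (Int × String)) (top_words : List (String × Int)) (used_top_words : Option (List String)) : List (String × String) :=
  let used0 : PySem.Set String := match used_top_words with | none => PySem.Set.empty | some l => l
  let top_sorted := PySem.List.sorted (PySem.Dict.ofList top_words).items (fun item => item.2) false
  let fin := bloco.foldl (pvPassoBlocoA top_sorted) (PySem.Dict.empty, PySem.Set.empty, used0, [])
  fin.2.2.2

-- ===== PORT B =====

-- B's inner letter loop body
def pvPassoLetraB (st : PySem.Set Char × PySem.Set Char × List (String × String)) (p : Char × Char) :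
    PySem.Set Char × PySem.Set Char × List (String × String) :=
  if PySem.Chars.islower p.1 || PySem.Set.contains st.1 p.1 then st
  else
    let c := PySem.Chars.lowerChar p.2
    if PySem.Set.contains st.2.1 c then st
    else (PySem.Set.add st.1 p.1, PySem.Set.add st.2.1 c, st.2.2 ++ [(String.mk [p.1], String.mk [c])])

-- B's outer loop body; state = (nxt, mapped, letras_usadas, mapeamentos)
def pvPassoBlocoB (by_len : PySem.Dict Int (List String))
    (st : PySem.Dict Int Int × PySem.Set Char × PySem.Set Char × List (String × String))
    (pp : Int × String) :
    PySem.Dict Int Int × PySem.Set Char × PySem.Set Char × List (String × String) :=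
  if pvIslower pp.2.toList then st
  else
    let L := PySem.Str.len pp.2
    let lst := by_len.getD L []
    let i := st.1.getD L 0
    if (lst.length : Int) ≤ i then st
    else
      match PySem.List.pyGet? lst i with
      | none => st  -- unreachable: 0 ≤ i < len(lst) here
      | some cand =>
        if cand = "" then st
        else
          let r := (pp.2.toList.zip cand.toList).foldl pvPassoLetraB (st.2.1, st.2.2.1, st.2.2.2)
          (st.1.insert L (i + 1), r.1, r.2.1, r.2.2)

def gerar_mapeamentos_por_bloco_alt (bloco : List (Int × String)) (top_words : List (String × Int)) (used_top_words : Option (List String)) : List (String × String) :=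
  let used0 : PySem.Set String := used_top_words.getD []
  let fresh := ((PySem.List.sorted (PySem.Dict.ofList top_words).items (fun item => item.2) false).filter
      (fun p => !(PySem.Set.contains used0 p.1))).map (fun p => p.1)
  let by_len := fresh.foldl (fun d w => d.modify (PySem.Str.len w) [] (fun l => l ++ [w])) PySem.Dict.empty
  let fin := bloco.foldl (pvPassoBlocoB by_len) (PySem.Dict.empty, PySem.Set.empty, PySem.Set.empty, [])
  fin.2.2.2

-- ===== PRECONDITION & SPEC =====
def Spec_gerar_mapeamentos_por_bloco (bloco : List (Int × String)) (top_words : List (String × Int)) (used_top_words : Option (List String)) (out : List (String × String)) : Prop := out = gerar_mapeamentos_por_bloco_alt bloco top_words used_top_words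
instance (bloco : List (Int × String)) (top_words : List (String × Int)) (used_top_words : Option (List String)) (out : List (String × String)) : Decidable (Spec_gerar_mapeamentos_por_bloco bloco top_words used_top_words out) := by unfold Spec_gerar_mapeamentos_por_bloco; infer_instance

-- ===== CLAIM (what is proved, stated in full; the proofs are below) =====
def Claim_equal_gerar_mapeamentos_por_bloco : Prop := ∀ (bloco : List (Int × String)) (top_words : List (String × Int)) (used_top_words : Option (List String)), Dom_gerar_mapeamentos_por_bloco bloco top_words used_top_words → Spec_gerar_mapeamentos_por_bloco bloco top_words used_top_words (gerar_mapeamentos_por_bloco bloco top_words used_top_words)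

-- ===== LEMMAS AND PROOFS =====

-- the words of length L, in rank order, still available given the used set
def pvAvail (ts : List (String × Int)) (used : PySem.Set String) (L : Int) : List String :=
  (ts.filter (fun p => (PySem.Str.len p.1 == L) && !(PySem.Set.contains used p.1))).map (fun p => p.1)

theorem setContains_add {α : Type} [BEq α] [LawfulBEq α] (s : PySem.Set α) (x y : α) :
    PySem.Set.contains (PySem.Set.add s x) y = (y == x || PySem.Set.contains s y) := by
  by_cases h : y = x <;> by_cases h2 : y ∈ s <;>
    simp [h, h2, PySem.Set.mem_add, PySem.Set.contains_eq_listContains]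

theorem pvPrimeira_eq_head (ts : List (String × Int)) (used : PySem.Set String) (L : Int) :
    pvPrimeiraCandidata ts used L = (pvAvail ts used L).head? := by
  induction ts with
  | nil => rfl
  | cons p rest ih =>
    obtain ⟨w, r⟩ := p
    cases h : (PySem.Str.len w == L && !(PySem.Set.contains used w)) with
    | true => simp only [pvPrimeiraCandidata, pvAvail, List.filter_cons, h, if_true,
        List.map_cons, List.head?_cons]
    | false =>
      simp only [pvPrimeiraCandidata, pvAvail, List.filter_cons, h, if_false, Bool.false_eq_true]
      exact ih

theorem pvInner_rel (zl : List (Char × Char)) (mapa : PySem.Dict Char Char)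
    (mapped letras : PySem.Set Char) (acc : List (String × String))
    (h : ∀ c, mapa.contains c = PySem.Set.contains mapped c) :
    (zl.foldl pvPassoLetraA (mapa, letras, acc)).2.1 = (zl.foldl pvPassoLetraB (mapped, letras, acc)).2.1 ∧
    (zl.foldl pvPassoLetraA (mapa, letras, acc)).2.2 = (zl.foldl pvPassoLetraB (mapped, letras, acc)).2.2 ∧
    (∀ c, (zl.foldl pvPassoLetraA (mapa, letras, acc)).1.contains c
        = PySem.Set.contains (zl.foldl pvPassoLetraB (mapped, letras, acc)).1 c) := by
  induction zl generalizing mapa mapped letras acc with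
  | nil => exact ⟨rfl, rfl, h⟩
  | cons p zl ih =>
    simp only [List.foldl_cons]
    cases h1 : PySem.Chars.islower p.1 with
    | true =>
      simp only [pvPassoLetraA, pvPassoLetraB, h1, Bool.true_or, if_true]
      exact ih _ _ _ _ h
    | false =>
      cases h2 : mapa.contains p.1 with
      | true =>
        have hm : PySem.Set.contains mapped p.1 = true := by rw [← h p.1]; exact h2
        simp only [pvPassoLetraA, pvPassoLetraB, h1, h2, hm, Bool.false_or, if_true, ite_true,
          Bool.false_eq_true, if_false, ite_false]
        exact ih _ _ _ _ h
      | false =>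
        have hm : PySem.Set.contains mapped p.1 = false := by rw [← h p.1]; exact h2
        cases h3 : PySem.Set.contains letras (PySem.Chars.lowerChar p.2) with
        | true =>
          simp only [pvPassoLetraA, pvPassoLetraB, h1, h2, hm, h3, Bool.false_or, if_true,
            ite_true, Bool.false_eq_true, if_false, ite_false]
          exact ih _ _ _ _ h
        | false =>
          simp only [pvPassoLetraA, pvPassoLetraB, h1, h2, hm, h3, Bool.false_or,
            Bool.false_eq_true, if_false, ite_false]
          apply ih
          intro c
          rw [PySem.Dict.contains_insert, setContains_add, h c]

theorem pvAvail_add_of_ne (ts : List (String × Int)) (used : PySem.Set String) (L L' : Int)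
    (cand : String) (hc : cand ∈ pvAvail ts used L) (hne : L' ≠ L) :
    pvAvail ts (PySem.Set.add used cand) L' = pvAvail ts used L' := by
  have hlen : PySem.Str.len cand = L := by
    simp only [pvAvail, List.mem_map, List.mem_filter] at hc
    obtain ⟨p, ⟨_, hp⟩, rfl⟩ := hc
    simp only [Bool.and_eq_true, beq_iff_eq] at hp
    exact hp.1
  unfold pvAvail
  congr 1
  apply List.filter_congr
  intro x _
  cases h2 : (PySem.Str.len x.1 == L') with
  | false => simp [h2]
  | true =>
    have hx : (x.1 == cand) = false := by
      apply beq_eq_false_iff_ne.mpr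
      intro hxe
      apply hne
      have := beq_iff_eq.mp h2
      rw [hxe, hlen] at this
      exact this.symm
    rw [setContains_add, hx]
    simp

theorem pvAvail_add_head (ts : List (String × Int)) (used : PySem.Set String) (L : Int)
    (cand : String) (rest : List String) (nd : (ts.map (fun p => p.1)).Nodup)
    (h : pvAvail ts used L = cand :: rest) :
    pvAvail ts (PySem.Set.add used cand) L = rest := by
  have hstep : pvAvail ts (PySem.Set.add used cand) L
      = (pvAvail ts used L).filter (fun w => !(w == cand)) := by
    unfold pvAvail
    rw [List.filter_map, List.filter_filter]
    congr 1
    apply List.filter_congr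
    intro x _
    simp only [Function.comp_def]
    rw [setContains_add]
    cases PySem.Str.len x.1 == L <;> cases x.1 == cand <;> cases PySem.Set.contains used x.1 <;> rfl
  have hnd2 : (pvAvail ts used L).Nodup := by
    unfold pvAvail
    exact nd.sublist (List.Sublist.map (fun p : String × Int => p.1) List.filter_sublist)
  rw [hstep, h, List.filter_cons]
  simp only [beq_self_eq_true, Bool.not_true, Bool.false_eq_true, if_false, ite_false]
  apply List.filter_eq_self.mpr
  intro w hw
  have : w ≠ cand := by
    rw [h] at hnd2
    intro he; exact (List.nodup_cons.mp hnd2).1 (he ▸ hw)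
  simpa using this

-- the main loop invariant carries A = B through the fold over bloco
theorem pvMain (ts : List (String × Int)) (q : PySem.Dict Int (List String))
    (nd : (ts.map (fun p => p.1)).Nodup) :
    ∀ (bloco : List (Int × String)) (mapa : PySem.Dict Char Char) (nxt : PySem.Dict Int Int)
      (mapped letras : PySem.Set Char) (used : PySem.Set String) (acc : List (String × String)),
      (∀ c, mapa.contains c = PySem.Set.contains mapped c) →
      (∀ L, 0 ≤ nxt.getD L 0 ∧ (q.getD L []).drop (nxt.getD L 0).toNat = pvAvail ts used L) →
      (bloco.foldl (pvPassoBlocoA ts) (mapa, letras, used, acc)).2.2.2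
        = (bloco.foldl (pvPassoBlocoB q) (nxt, mapped, letras, acc)).2.2.2 := by
  intro bloco
  induction bloco with
  | nil => intro mapa nxt mapped letras used acc hrel hinv; rfl
  | cons pp bloco ih =>
    intro mapa nxt mapped letras used acc hrel hinv
    simp only [List.foldl_cons]
    cases hl : pvIslower pp.2.toList with
    | true =>
      simp only [pvPassoBlocoA, pvPassoBlocoB, hl, if_true]
      exact ih _ _ _ _ _ _ hrel hinv
    | false =>
      obtain ⟨hge, hdrop⟩ := hinv (PySem.Str.len pp.2)
      cases havail : pvAvail ts used (PySem.Str.len pp.2) with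
      | nil =>
        have ha : pvPrimeiraCandidata ts used (PySem.Str.len pp.2) = none := by
          rw [pvPrimeira_eq_head, havail]; rfl
        have hlen : ((q.getD (PySem.Str.len pp.2) []).length : Int)
            ≤ nxt.getD (PySem.Str.len pp.2) 0 := by
          have h2 := List.drop_eq_nil_iff.mp (hdrop.trans havail)
          omega
        simp only [pvPassoBlocoA, pvPassoBlocoB, hl, ha, Bool.false_eq_true, if_false, ite_false]
        rw [if_pos hlen]
        exact ih _ _ _ _ _ _ hrel hinv
      | cons cand rest =>
        have ha : pvPrimeiraCandidata ts used (PySem.Str.len pp.2) = some cand := by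
          rw [pvPrimeira_eq_head, havail]; rfl
        have hlt : ¬ ((q.getD (PySem.Str.len pp.2) []).length : Int)
            ≤ nxt.getD (PySem.Str.len pp.2) 0 := by
          have hne : (q.getD (PySem.Str.len pp.2) []).drop
              (nxt.getD (PySem.Str.len pp.2) 0).toNat ≠ [] := by
            rw [hdrop, havail]; simp
          have hlt' : (nxt.getD (PySem.Str.len pp.2) 0).toNat
              < (q.getD (PySem.Str.len pp.2) []).length := by
            by_contra hx
            exact hne (List.drop_eq_nil_iff.mpr (by omega))
          omega
        have hget : PySem.List.pyGet? (q.getD (PySem.Str.len pp.2) [])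
            (nxt.getD (PySem.Str.len pp.2) 0) = some cand := by
          have h1 : (q.getD (PySem.Str.len pp.2) [])[(nxt.getD (PySem.Str.len pp.2) 0).toNat]?
              = some cand := by
            rw [← List.head?_drop, hdrop, havail]
            rfl
          rw [← Int.toNat_of_nonneg hge, PySem.List.pyGet?_natCast]
          exact h1
        by_cases hc : cand = ""
        · simp only [pvPassoBlocoA, pvPassoBlocoB, hl, ha, Bool.false_eq_true, if_false, ite_false]
          rw [if_neg hlt, hget]
          simp only [hc, if_true, ite_true]
          exact ih _ _ _ _ _ _ hrel hinv
        · obtain ⟨hl1, hl2, hrel'⟩ :=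
            pvInner_rel (pp.2.toList.zip cand.toList) mapa mapped letras acc hrel
          simp only [pvPassoBlocoA, pvPassoBlocoB, hl, ha, Bool.false_eq_true, if_false, ite_false]
          rw [if_neg hlt, hget]
          simp only [hc, if_false, ite_false]
          rw [← hl1, ← hl2]
          apply ih _ _ _ _ _ _ hrel'
          intro L'
          by_cases hLL : L' = PySem.Str.len pp.2
          · subst hLL
            rw [PySem.Dict.getD_insert_self]
            refine ⟨by omega, ?_⟩
            have ht : (nxt.getD (PySem.Str.len pp.2) 0 + 1).toNat
                = (nxt.getD (PySem.Str.len pp.2) 0).toNat + 1 := by omega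
            rw [ht, ← List.tail_drop, hdrop, havail,
              pvAvail_add_head ts used (PySem.Str.len pp.2) cand rest nd havail]
            rfl
          · rw [PySem.Dict.getD_insert _ _ _ _ _, if_neg hLL]
            obtain ⟨hge', hdrop'⟩ := hinv L'
            refine ⟨hge', ?_⟩
            rw [hdrop']
            exact (pvAvail_add_of_ne ts used (PySem.Str.len pp.2) L' cand
              (havail ▸ List.mem_cons_self) hLL).symm

theorem pvByLen_getD' (fresh : List String) (L : Int) :
    ((fresh.foldl (fun d w => d.modify (PySem.Str.len w) [] (fun l => l ++ [w])) PySem.Dict.empty).getD L [])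
      = fresh.filter (fun w => PySem.Str.len w == L) := by
  have h := PySem.Dict.getD_foldl_modify_append (fresh.map (fun w => (PySem.Str.len w, w))) PySem.Dict.empty L
  rw [List.foldl_map] at h
  simpa [List.filter_map, List.map_map, Function.comp_def, List.map_id'] using h

theorem pvFresh_filter (ts : List (String × Int)) (used0 : PySem.Set String) (L : Int) :
    (((ts.filter (fun p => !(PySem.Set.contains used0 p.1))).map (fun p => p.1)).filter
        (fun w => PySem.Str.len w == L)) = pvAvail ts used0 L := by
  rw [List.filter_map, List.filter_filter]
  unfold pvAvail
  congr 1

theorem pvInit (ts : List (String × Int)) (used0 : PySem.Set String) (L : Int) :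
    ((((ts.filter (fun p => !(PySem.Set.contains used0 p.1))).map (fun p => p.1)).foldl
        (fun d w => d.modify (PySem.Str.len w) [] (fun l => l ++ [w])) PySem.Dict.empty).getD L [])
      = pvAvail ts used0 L := by
  rw [pvByLen_getD']
  exact pvFresh_filter _ _ _

-- ===== VERDICT (by name: the statement is the Claim_ definition above) =====
theorem gerar_mapeamentos_por_bloco_spec : Claim_equal_gerar_mapeamentos_por_bloco := by
  intro bloco top_words used_top_words _
  unfold Spec_gerar_mapeamentos_por_bloco gerar_mapeamentos_por_bloco gerar_mapeamentos_por_bloco_alt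
  have hnd : (List.map (fun p : String × Int => p.1)
      (PySem.List.sorted (PySem.Dict.ofList top_words).items fun item => item.2 : List (String × Int))).Nodup := by
    have hk := PySem.Dict.nodup_keys_ofList top_words
    simp only [PySem.Dict.keys] at hk
    have hp := (PySem.List.sorted_perm (PySem.Dict.ofList top_words).items
        (fun item => item.2) false).map (fun p : String × Int => p.1)
    exact hp.nodup_iff.mpr hk
  cases used_top_words with
  | none =>
    apply pvMain
    · exact hnd
    · intro c; simp [PySem.Dict.contains_empty]
    · intro L
      refine ⟨by simp [PySem.Dict.getD_empty], ?_⟩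
      simp only [PySem.Dict.getD_empty, Int.toNat_zero, List.drop_zero]
      exact pvInit _ _ _
  | some l =>
    apply pvMain
    · exact hnd
    · intro c; simp [PySem.Dict.contains_empty]
    · intro L
      refine ⟨by simp [PySem.Dict.getD_empty], ?_⟩
      simp only [PySem.Dict.getD_empty, Int.toNat_zero, List.drop_zero]
      exact pvInit _ l _
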